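-- pv_equiv track=rewrite | github.com/leonardosos/DistributedControlProject | formation/formation_control.py | generate_zigzag
-- ===== SOURCE A (Python) =====
-- def generate_zigzag(rows, cols):
--     """
--     Generates a zigzag path for the leader to follow in a grid.
--     """
--     zigzag_path = []
--     for col in range(cols):
--         if col % 2 == 0:  # Even column: top-to-bottom
--             for row in range(rows):
--                 zigzag_path.append([row, col])
--         else:  # Odd column: bottom-to-top
--             for row in range(rows - 1, -1, -1):
--                 zigzag_path.append([row, col])
--     return zigzag_path
-- ===== SOURCE B (Python) =====
-- def generate_zigzag(rows, cols):
--     """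
--     Generates a zigzag path for the leader to follow in a grid.
--     (flat single loop over cell indices instead of nested column loops)
--     """
--     if rows <= 0 or cols <= 0:
--         return []
--     path = []
--     for i in range(rows * cols):
--         col, pos = divmod(i, rows)
--         row = pos if col % 2 == 0 else rows - 1 - pos
--         path.append([row, col])
--     return path
-- ===== Notes on version B (the rewrite author's own statement) =====
-- stated objective: alternative
-- what changed: Replaces the outer column loop with two direction-dependent inner loops by one flat loop over cell indices, recovering (col,row) from the index with divmod and parity arithmetic.
import Mathlib
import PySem

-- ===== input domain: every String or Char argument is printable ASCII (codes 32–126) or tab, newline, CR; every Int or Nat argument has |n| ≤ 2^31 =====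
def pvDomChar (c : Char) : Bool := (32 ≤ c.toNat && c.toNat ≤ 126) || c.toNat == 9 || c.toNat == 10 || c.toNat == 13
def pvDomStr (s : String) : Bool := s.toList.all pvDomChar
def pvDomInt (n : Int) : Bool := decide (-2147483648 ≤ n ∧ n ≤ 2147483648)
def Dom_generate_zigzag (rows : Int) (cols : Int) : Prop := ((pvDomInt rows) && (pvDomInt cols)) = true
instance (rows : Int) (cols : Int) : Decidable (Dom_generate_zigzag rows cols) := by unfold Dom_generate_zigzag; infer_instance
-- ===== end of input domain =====

-- B traverses the grid by a single flat index loop (divmod arithmetic) instead of A's nested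
-- column/row loops with a parity branch on the loop direction; same cost, alternative structure.

-- ===== PORT A =====
def generate_zigzag (rows : Int) (cols : Int) : List (List Int) :=
  (PySem.List.pyRange 0 cols 1).foldl (fun acc col =>
    if PySem.Int.mod col 2 = 0 then
      (PySem.List.pyRange 0 rows 1).foldl (fun a row => a ++ [[row, col]]) acc
    else
      (PySem.List.pyRange (rows - 1) (-1) (-1)).foldl (fun a row => a ++ [[row, col]]) acc) []

-- ===== PORT B =====
def generate_zigzag_alt (rows : Int) (cols : Int) : List (List Int) :=
  if rows ≤ 0 ∨ cols ≤ 0 then []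
  else
    (PySem.List.pyRange 0 (rows * cols) 1).foldl (fun acc i =>
      let col := PySem.Int.floordiv i rows
      let pos := PySem.Int.mod i rows
      let row := if PySem.Int.mod col 2 = 0 then pos else rows - 1 - pos
      acc ++ [[row, col]]) []

-- ===== PRECONDITION & SPEC =====
def Spec_generate_zigzag (rows : Int) (cols : Int) (out : List (List Int)) : Prop := out = generate_zigzag_alt rows cols
instance (rows : Int) (cols : Int) (out : List (List Int)) : Decidable (Spec_generate_zigzag rows cols out) := by unfold Spec_generate_zigzag; infer_instance

-- ===== CLAIM (what is proved, stated in full; the proofs are below) =====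
def Claim_equal_generate_zigzag : Prop := ∀ (rows : Int) (cols : Int), Dom_generate_zigzag rows cols → Spec_generate_zigzag rows cols (generate_zigzag rows cols)

-- ===== LEMMAS AND PROOFS =====

-- A's nested folds as a flatMap of per-column lists.
theorem A_flat (rows cols : Int) :
    generate_zigzag rows cols =
      (PySem.List.pyRange 0 cols 1).flatMap (fun col =>
        (if PySem.Int.mod col 2 = 0 then PySem.List.pyRange 0 rows 1
         else PySem.List.pyRange (rows - 1) (-1) (-1)).map (fun row => [row, col])) := by
  unfold generate_zigzag
  have hf : (fun (acc : List (List Int)) (col : Int) =>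
      if PySem.Int.mod col 2 = 0 then
        (PySem.List.pyRange 0 rows 1).foldl (fun a row => a ++ [[row, col]]) acc
      else
        (PySem.List.pyRange (rows - 1) (-1) (-1)).foldl (fun a row => a ++ [[row, col]]) acc)
      = (fun acc col => acc ++
          ((if PySem.Int.mod col 2 = 0 then PySem.List.pyRange 0 rows 1
            else PySem.List.pyRange (rows - 1) (-1) (-1)).map (fun row => [row, col]))) := by
    funext acc col
    by_cases hc : PySem.Int.mod col 2 = 0
    · rw [if_pos hc, if_pos hc, PySem.List.foldl_append_singleton_eq_map]
    · rw [if_neg hc, if_neg hc, PySem.List.foldl_append_singleton_eq_map]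
  rw [hf, PySem.List.foldl_append_eq_flatMap, List.nil_append]

-- A flat index range over the grid splits into its columns.
theorem flatGrid {α : Type} (m : Nat) (F : Nat → α) :
    ∀ n : Nat, (List.range (m * n)).map F
      = (List.range n).flatMap (fun c => (List.range m).map (fun r => F (c * m + r))) := by
  intro n
  induction n with
  | zero => simp
  | succ n ih =>
    rw [Nat.mul_succ, List.range_add, List.map_append, ih, List.range_succ,
        List.flatMap_append]
    simp [List.map_map, Function.comp, Nat.add_comm, Nat.mul_comm]

-- B's loop as a map over the flat index range (positive sizes).
theorem B_flat (m n : Nat) (hm : 0 < m) (hn : 0 < n) :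
    generate_zigzag_alt (m : Int) (n : Int)
      = (List.range (m * n)).map (fun k =>
          [if (k / m) % 2 = 0 then ((k % m : Nat) : Int) else (m : Int) - 1 - ((k % m : Nat) : Int),
           ((k / m : Nat) : Int)]) := by
  have hmod2 : ∀ c : Nat, PySem.Int.mod (c : Int) 2 = ((c % 2 : Nat) : Int) := by
    intro c; exact_mod_cast PySem.Int.mod_natCast c 2
  unfold generate_zigzag_alt
  rw [if_neg (by push Not; constructor <;> [exact_mod_cast hm; exact_mod_cast hn])]
  have hmn : ((m : Int) * (n : Int)) = ((m * n : Nat) : Int) := by push_cast; ring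
  rw [hmn, PySem.List.pyRange_one]
  simp only [sub_zero, Int.toNat_natCast, List.foldl_map, zero_add]
  rw [PySem.List.foldl_append_singleton_eq_map ((fun k : Nat =>
        [if PySem.Int.mod (PySem.Int.floordiv (k : Int) (m : Int)) 2 = 0
           then PySem.Int.mod (k : Int) (m : Int)
           else (m : Int) - 1 - PySem.Int.mod (k : Int) (m : Int),
         PySem.Int.floordiv (k : Int) (m : Int)]))]
  rw [List.nil_append]
  apply List.map_congr_left
  intro k _
  simp only [PySem.Int.floordiv_natCast, PySem.Int.mod_natCast, hmod2]
  by_cases h : k / m % 2 = 0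
  · rw [if_pos (by exact_mod_cast congrArg (Nat.cast : Nat → Int) h), if_pos h]
  · rw [if_neg (fun hx => h (by exact_mod_cast hx)), if_neg h]

theorem generate_zigzag_spec : Claim_equal_generate_zigzag := by
  intro rows cols _
  unfold Spec_generate_zigzag
  by_cases hz : rows ≤ 0 ∨ cols ≤ 0
  · rw [A_flat]
    unfold generate_zigzag_alt
    rw [if_pos hz]
    rcases hz with hr | hc
    · simp [PySem.List.pyRange_one_eq_nil (show rows ≤ 0 from hr),
            PySem.List.pyRange_neg_one_eq_nil (show rows - 1 ≤ -1 by omega)]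
    · simp [PySem.List.pyRange_one_eq_nil (show cols ≤ (0 : Int) from hc)]
  · push Not at hz
    obtain ⟨hr, hc⟩ := hz
    obtain ⟨m, rfl⟩ : ∃ m : Nat, rows = (m : Int) :=
      ⟨rows.toNat, (Int.toNat_of_nonneg (by omega)).symm⟩
    obtain ⟨n, rfl⟩ : ∃ n : Nat, cols = (n : Int) :=
      ⟨cols.toNat, (Int.toNat_of_nonneg (by omega)).symm⟩
    have hm : 0 < m := by exact_mod_cast hr
    have hn : 0 < n := by exact_mod_cast hc
    rw [A_flat, B_flat m n hm hn, flatGrid]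
    rw [PySem.List.pyRange_one 0 (n : Int)]
    have hcast : (((n : Int)) - 0).toNat = n := by omega
    rw [hcast]
    rw [List.flatMap_map]
    apply List.flatMap_congr
    intro c _
    have hdiv : ∀ r : Nat, r < m → (c * m + r) / m = c := by
      intro r hrm
      rw [Nat.add_comm, Nat.mul_comm, Nat.add_mul_div_left _ _ hm, Nat.div_eq_of_lt hrm,
          Nat.zero_add]
    have hmod : ∀ r : Nat, r < m → (c * m + r) % m = r := by
      intro r hrm
      rw [Nat.add_comm, Nat.mul_comm, Nat.add_mul_mod_self_left, Nat.mod_eq_of_lt hrm]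
    have hmod2 : ∀ c : Nat, PySem.Int.mod (c : Int) 2 = ((c % 2 : Nat) : Int) := by
      intro c; exact_mod_cast PySem.Int.mod_natCast c 2
    simp only [zero_add]
    by_cases hpar : c % 2 = 0
    · rw [if_pos (by rw [hmod2 c, hpar]; exact Nat.cast_zero)]
      rw [PySem.List.pyRange_one 0 (m : Int)]
      have hcm : (((m : Int)) - 0).toNat = m := by omega
      rw [hcm]
      simp only [List.map_map, zero_add]
      apply List.map_congr_left
      intro r hr'
      have hrm : r < m := List.mem_range.mp hr'
      simp [hdiv r hrm, hmod r hrm, hpar]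
    · rw [if_neg (by rw [hmod2]; intro h; exact hpar (by exact_mod_cast h))]
      rw [PySem.List.pyRange_neg_one]
      have hcm : ((m : Int) - 1 - (-1)).toNat = m := by omega
      rw [hcm]
      simp only [List.map_map]
      apply List.map_congr_left
      intro r hr'
      have hrm : r < m := List.mem_range.mp hr'
      simp [hdiv r hrm, hmod r hrm, hpar]
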